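-- pv_equiv track=rewrite | github.com/981377660LMT/algorithm-study | 11_动态规划/出租车问题/2008. 出租车的最大盈利 copy.py | maxTaxiEarnings
-- ===== SOURCE A (Python) =====
-- from bisect import bisect_right
-- from typing import List
--
-- def maxTaxiEarnings(n: int, rides: List[List[int]]) -> int:
--     rides.sort(key=lambda x: x[1])
--     dp = [e - s + t for s, e, t in rides]
--     ends = [e for _, e, _ in rides]
--
--     for i in range(1, len(rides)):
--         pre = bisect_right(ends, rides[i][0]) - 1
--         if pre >= 0:
--             dp[i] = max(dp[i - 1], dp[pre] + rides[i][1] - rides[i][0] + rides[i][2])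
--         else:
--             dp[i] = max(dp[i - 1], rides[i][1] - rides[i][0] + rides[i][2])
--     return dp[-1]
-- ===== SOURCE B (Python) =====
-- def maxTaxiEarnings(n, rides):
--     rides.sort(key=lambda x: x[1])
--     m = len(rides)
--     # offline predecessor search: instead of a binary search per ride, walk the
--     # end-sorted rides once with a pointer while visiting rides in start order
--     pre = [0] * m
--     j = 0
--     for k in sorted(range(m), key=lambda i: rides[i][0]):
--         while j < m and rides[j][1] <= rides[k][0]:
--             j += 1
--         pre[k] = j - 1
--     dp = [e - s + t for s, e, t in rides]
--     best = dp[0]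
--     for i in range(1, m):
--         gain = dp[i] if pre[i] < 0 else dp[pre[i]] + dp[i]
--         best = max(best, gain)
--         dp[i] = best
--     return best
-- ===== Notes on version B (the rewrite author's own statement) =====
-- stated objective: alternative
-- what changed: B drops the per-ride bisect_right binary search: it precomputes every ride's predecessor index in one two-pointer merge of the start-sorted index order against the end-sorted rides, then fills the dp array in a single fold that carries a running maximum instead of re-reading dp[i-1].
import Mathlib
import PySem

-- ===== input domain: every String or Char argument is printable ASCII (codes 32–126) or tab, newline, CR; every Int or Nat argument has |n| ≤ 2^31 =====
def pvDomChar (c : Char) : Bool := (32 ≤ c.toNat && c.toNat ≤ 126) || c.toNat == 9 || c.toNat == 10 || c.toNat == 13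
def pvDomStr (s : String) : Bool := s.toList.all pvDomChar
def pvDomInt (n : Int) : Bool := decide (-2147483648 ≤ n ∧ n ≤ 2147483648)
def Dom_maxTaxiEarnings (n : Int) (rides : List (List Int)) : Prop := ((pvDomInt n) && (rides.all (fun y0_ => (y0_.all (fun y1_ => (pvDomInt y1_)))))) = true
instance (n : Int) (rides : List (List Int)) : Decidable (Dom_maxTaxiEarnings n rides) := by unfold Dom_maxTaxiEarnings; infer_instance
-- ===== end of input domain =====

-- B replaces A's per-ride binary search by one two-pointer sweep (a second, start-ordered
-- pass) that precomputes every ride's predecessor index, and folds with a running maximum;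
-- same sort of `rides` (A mutates it in place, B performs the identical mutation).

-- ===== PORT A =====
-- rides.sort(key=lambda x: x[1]); dp = [e-s+t ...]; ends = [e ...];
-- for i in range(1, len(rides)): pre = bisect_right(ends, rides[i][0]) - 1; ...
-- return dp[-1]     (dp[-1] on empty rides raises IndexError: excluded by Pre_)
def maxTaxiEarnings (n : Int) (rides : List (List Int)) : Int :=
  let rs := PySem.List.sorted rides (fun x => PySem.List.pyGetD x 1 0) false
  let dp := rs.map (fun r => PySem.List.pyGetD r 1 0 - PySem.List.pyGetD r 0 0 + PySem.List.pyGetD r 2 0)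
  let ends := rs.map (fun r => PySem.List.pyGetD r 1 0)
  let dp := (PySem.List.pyRange 1 (rs.length : Int) 1).foldl (fun dp i =>
      let pre : Int := (PySem.List.bisectRight ends (PySem.List.pyGetD (PySem.List.pyGetD rs i []) 0 0) : Int) - 1
      if pre ≥ 0 then
        PySem.List.pySetD dp i (max (PySem.List.pyGetD dp (i - 1) 0)
          (PySem.List.pyGetD dp pre 0 + PySem.List.pyGetD (PySem.List.pyGetD rs i []) 1 0
            - PySem.List.pyGetD (PySem.List.pyGetD rs i []) 0 0
            + PySem.List.pyGetD (PySem.List.pyGetD rs i []) 2 0))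
      else
        PySem.List.pySetD dp i (max (PySem.List.pyGetD dp (i - 1) 0)
          (PySem.List.pyGetD (PySem.List.pyGetD rs i []) 1 0
            - PySem.List.pyGetD (PySem.List.pyGetD rs i []) 0 0
            + PySem.List.pyGetD (PySem.List.pyGetD rs i []) 2 0))) dp
  PySem.List.pyGetD dp (-1) 0

-- ===== PORT B =====
-- while j < m and rides[j][1] <= rides[k][0]: j += 1
def advB (rs : List (List Int)) (m j v : Int) : Int :=
  if h : j < m ∧ PySem.List.pyGetD (PySem.List.pyGetD rs j []) 1 0 ≤ v then
    advB rs m (j + 1) v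
  else j
termination_by (m - j).toNat
decreasing_by omega

def maxTaxiEarnings_alt (n : Int) (rides : List (List Int)) : Int :=
  let rs := PySem.List.sorted rides (fun x => PySem.List.pyGetD x 1 0) false
  let m : Int := rs.length
  -- pre = [0]*m; j = 0; for k in sorted(range(m), key=lambda i: rides[i][0]): ...
  let st := (PySem.List.sorted (PySem.List.pyRange 0 m 1)
                (fun i => PySem.List.pyGetD (PySem.List.pyGetD rs i []) 0 0) false).foldl
      (fun (st : Int × List Int) k =>
        let j := advB rs m st.1 (PySem.List.pyGetD (PySem.List.pyGetD rs k []) 0 0)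
        (j, PySem.List.pySetD st.2 k (j - 1)))
      (0, List.replicate rs.length 0)
  let pre := st.2
  let dp := rs.map (fun r => PySem.List.pyGetD r 1 0 - PySem.List.pyGetD r 0 0 + PySem.List.pyGetD r 2 0)
  let best := PySem.List.pyGetD dp 0 0     -- dp[0] on empty rides raises IndexError: excluded by Pre_
  let res := (PySem.List.pyRange 1 m 1).foldl
      (fun (st : List Int × Int) i =>
        let gain := if PySem.List.pyGetD pre i 0 < 0 then PySem.List.pyGetD st.1 i 0
          else PySem.List.pyGetD st.1 (PySem.List.pyGetD pre i 0) 0 + PySem.List.pyGetD st.1 i 0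
        let best := max st.2 gain
        (PySem.List.pySetD st.1 i best, best))
      (dp, best)
  res.2

-- ===== PRECONDITION & SPEC =====
-- Pre_ excludes exactly the inputs on which A raises: empty `rides` (dp[-1] is an
-- IndexError) and rides that are not length-3 triples (the sort key or the unpacking
-- `for s, e, t in rides` raises). B raises on exactly the same inputs.
def Pre_maxTaxiEarnings (n : Int) (rides : List (List Int)) : Prop :=
  rides ≠ [] ∧ ∀ r ∈ rides, r.length = 3
instance (n : Int) (rides : List (List Int)) : Decidable (Pre_maxTaxiEarnings n rides) := by
  unfold Pre_maxTaxiEarnings; infer_instance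

def pvWitness_maxTaxiEarnings : Int × List (List Int) := (20, [[2, 5, 4], [1, 5, 1], [0, 2, 1]])

def Spec_maxTaxiEarnings (n : Int) (rides : List (List Int)) (out : Int) : Prop := out = maxTaxiEarnings_alt n rides
instance (n : Int) (rides : List (List Int)) (out : Int) : Decidable (Spec_maxTaxiEarnings n rides out) := by unfold Spec_maxTaxiEarnings; infer_instance

-- ===== CLAIM (what is proved, stated in full; the proofs are below) =====
def Claim_equal_maxTaxiEarnings : Prop := ∀ (n : Int) (rides : List (List Int)), Dom_maxTaxiEarnings n rides → Pre_maxTaxiEarnings n rides → Spec_maxTaxiEarnings n rides (maxTaxiEarnings n rides)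

-- ===== LEMMAS AND PROOFS =====

def endsOf (rs : List (List Int)) : List Int := rs.map (fun r => PySem.List.pyGetD r 1 0)
def keyS (rs : List (List Int)) (i : Int) : Int := PySem.List.pyGetD (PySem.List.pyGetD rs i []) 0 0

lemma endsOf_len (rs : List (List Int)) : (endsOf rs).length = rs.length := by
  simp [endsOf]

lemma endsOf_get (rs : List (List Int)) (j : Int) (h0 : 0 ≤ j) (h1 : j < (rs.length : Int)) :
    PySem.List.pyGetD (PySem.List.pyGetD rs j []) 1 0
      = (endsOf rs)[j.toNat]'(by simp [endsOf]; omega) := by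
  rw [PySem.List.pyGetD_eq_getElem rs ([] : List Int) h0 h1]
  simp [endsOf]

lemma advB_eq (rs : List (List Int)) (v : Int)
    (hpw : (endsOf rs).Pairwise (· ≤ ·)) :
    ∀ (d : Nat) (j : Int), 0 ≤ j → j ≤ (rs.length : Int) → ((rs.length : Int) - j).toNat = d →
    (∀ k : Nat, (hk : k < (endsOf rs).length) → (k : Int) < j → (endsOf rs)[k] ≤ v) →
    advB rs (rs.length : Int) j v = (PySem.List.bisectRight (endsOf rs) v : Int) := by
  intro d
  induction d with
  | zero =>
    intro j h0 h1 hd hbelow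
    have hj : j = (rs.length : Int) := by omega
    obtain ⟨hb1, hb2, hb3⟩ := PySem.List.bisectRight_spec (endsOf rs) v hpw
    rw [advB]
    have hng : ¬ (j < (rs.length : Int) ∧ PySem.List.pyGetD (PySem.List.pyGetD rs j []) 1 0 ≤ v) := by
      intro h; omega
    rw [dif_neg hng, hj]
    have : PySem.List.bisectRight (endsOf rs) v = rs.length := by
      by_contra hne
      have hlt : PySem.List.bisectRight (endsOf rs) v < rs.length := by
        have := hb1; rw [endsOf_len] at this; omega
      have h1' := hb3 _ (by rw [endsOf_len]; exact hlt) le_rfl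
      have h2' := hbelow _ (by rw [endsOf_len]; exact hlt) (by omega)
      omega
    omega
  | succ d ih =>
    intro j h0 h1 hd hbelow
    obtain ⟨hb1, hb2, hb3⟩ := PySem.List.bisectRight_spec (endsOf rs) v hpw
    have hjlt : j < (rs.length : Int) := by omega
    rw [advB]
    by_cases hguard : PySem.List.pyGetD (PySem.List.pyGetD rs j []) 1 0 ≤ v
    · rw [dif_pos ⟨hjlt, hguard⟩]
      apply ih (j + 1) (by omega) (by omega) (by omega)
      intro k hk hklt
      by_cases hkj : (k : Int) < j
      · exact hbelow k hk hkj
      · have : (k : Int) = j := by omega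
        have hkeq : k = j.toNat := by omega
        rw [endsOf_get rs j h0 hjlt] at hguard
        subst hkeq; exact hguard
    · rw [dif_neg (by intro h; exact hguard h.2)]
      rw [endsOf_get rs j h0 hjlt] at hguard
      rw [not_le] at hguard
      -- j is exactly the bisect point
      have hjn : j.toNat < (endsOf rs).length := by rw [endsOf_len]; omega
      have hle : PySem.List.bisectRight (endsOf rs) v ≤ j.toNat := by
        by_contra hlt
        exact absurd (hb2 j.toNat hjn (by omega)) (by omega)
      have hge : j.toNat ≤ PySem.List.bisectRight (endsOf rs) v := by
        by_contra hlt
        rw [not_le] at hlt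
        have hbl : PySem.List.bisectRight (endsOf rs) v < (endsOf rs).length := by omega
        have h1' := hbelow _ hbl (by omega)
        have h2' := hb3 _ hbl le_rfl
        omega
      omega

lemma sweep_eq (rs : List (List Int)) (hpw : (endsOf rs).Pairwise (· ≤ ·)) :
    ∀ (q : List Int) (j0 : Int) (acc : List Int),
    acc.length = rs.length →
    (∀ i ∈ q, 0 ≤ i ∧ i < (rs.length : Int)) →
    q.Pairwise (fun a b => keyS rs a ≤ keyS rs b) →
    0 ≤ j0 → j0 ≤ (rs.length : Int) →
    (∀ k : Nat, (hk : k < (endsOf rs).length) → (k : Int) < j0 → ∀ i ∈ q, (endsOf rs)[k] ≤ keyS rs i) →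
    ((q.foldl (fun (st : Int × List Int) k =>
        (advB rs (rs.length : Int) st.1 (PySem.List.pyGetD (PySem.List.pyGetD rs k []) 0 0),
         PySem.List.pySetD st.2 k (advB rs (rs.length : Int) st.1 (PySem.List.pyGetD (PySem.List.pyGetD rs k []) 0 0) - 1)))
        (j0, acc)).2.length = rs.length ∧
     ∀ i : Int, 0 ≤ i → i < (rs.length : Int) →
      ((i ∈ q → PySem.List.pyGetD (q.foldl (fun (st : Int × List Int) k =>
        (advB rs (rs.length : Int) st.1 (PySem.List.pyGetD (PySem.List.pyGetD rs k []) 0 0),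
         PySem.List.pySetD st.2 k (advB rs (rs.length : Int) st.1 (PySem.List.pyGetD (PySem.List.pyGetD rs k []) 0 0) - 1)))
        (j0, acc)).2 i 0 = (PySem.List.bisectRight (endsOf rs) (keyS rs i) : Int) - 1)
       ∧ (i ∉ q → PySem.List.pyGetD (q.foldl (fun (st : Int × List Int) k =>
        (advB rs (rs.length : Int) st.1 (PySem.List.pyGetD (PySem.List.pyGetD rs k []) 0 0),
         PySem.List.pySetD st.2 k (advB rs (rs.length : Int) st.1 (PySem.List.pyGetD (PySem.List.pyGetD rs k []) 0 0) - 1)))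
        (j0, acc)).2 i 0 = PySem.List.pyGetD acc i 0))) := by
  intro q
  induction q with
  | nil =>
    intro j0 acc hlen _ _ _ _ _
    refine ⟨hlen, ?_⟩
    intro i _ _
    exact ⟨fun h => absurd h (List.not_mem_nil), fun _ => rfl⟩
  | cons k0 q ih =>
    intro j0 acc hlen hmem hpq hj0 hj1 hbelow
    obtain ⟨hk00, hk01⟩ := hmem k0 List.mem_cons_self
    have hadv : advB rs (rs.length : Int) j0 (PySem.List.pyGetD (PySem.List.pyGetD rs k0 []) 0 0)
        = (PySem.List.bisectRight (endsOf rs) (keyS rs k0) : Int) := by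
      exact advB_eq rs (keyS rs k0) hpw _ j0 hj0 hj1 rfl
        (fun k hk hklt => hbelow k hk hklt k0 List.mem_cons_self)
    obtain ⟨hb1, hb2, hb3⟩ := PySem.List.bisectRight_spec (endsOf rs) (keyS rs k0) hpw
    rw [endsOf_len] at hb1
    simp only [List.foldl_cons]
    have hpq' := (List.pairwise_cons.mp hpq)
    have ihres := ih (advB rs (rs.length : Int) j0 (PySem.List.pyGetD (PySem.List.pyGetD rs k0 []) 0 0))
      (PySem.List.pySetD acc k0 (advB rs (rs.length : Int) j0 (PySem.List.pyGetD (PySem.List.pyGetD rs k0 []) 0 0) - 1))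
      (by rw [PySem.List.length_pySetD]; exact hlen)
      (fun i hi => hmem i (List.mem_cons_of_mem _ hi))
      hpq'.2
      (by rw [hadv]; positivity)
      (by rw [hadv]; exact_mod_cast hb1)
      (by
        intro k hk hklt i hi
        rw [hadv] at hklt
        have h1 : (endsOf rs)[k] ≤ keyS rs k0 := hb2 k hk (by exact_mod_cast hklt)
        exact le_trans h1 (hpq'.1 i hi))
    refine ⟨ihres.1, ?_⟩
    intro i hi0 hi1
    have hgetset : PySem.List.pyGetD (PySem.List.pySetD acc k0
        (advB rs (rs.length : Int) j0 (PySem.List.pyGetD (PySem.List.pyGetD rs k0 []) 0 0) - 1)) i 0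
        = if i.toNat = k0.toNat then (PySem.List.bisectRight (endsOf rs) (keyS rs k0) : Int) - 1
          else PySem.List.pyGetD acc i 0 := by
      have e1 : (k0.toNat : Int) = k0 := Int.toNat_of_nonneg hk00
      have e2 : (i.toNat : Int) = i := Int.toNat_of_nonneg hi0
      rw [hadv, ← e1, ← e2]
      exact PySem.List.pyGetD_pySetD_natCast acc k0.toNat i.toNat _ 0 (by rw [← hlen] at hk01; omega)
    constructor
    · intro hmem'
      rcases List.mem_cons.mp hmem' with heq | htail
      · subst heq
        by_cases hit : i ∈ q
        · exact (ihres.2 i hi0 hi1).1 hit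
        · rw [(ihres.2 i hi0 hi1).2 hit, hgetset, if_pos rfl]
      · exact (ihres.2 i hi0 hi1).1 htail
    · intro hnmem
      have hiq : i ∉ q := fun h => hnmem (List.mem_cons_of_mem _ h)
      have hik0 : i ≠ k0 := fun h => hnmem (h ▸ List.mem_cons_self)
      rw [(ihres.2 i hi0 hi1).2 hiq, hgetset, if_neg (by omega)]

def profOf (rs : List (List Int)) : List Int :=
  rs.map (fun r => PySem.List.pyGetD r 1 0 - PySem.List.pyGetD r 0 0 + PySem.List.pyGetD r 2 0)

lemma profOf_len (rs : List (List Int)) : (profOf rs).length = rs.length := by simp [profOf]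

lemma profOf_get (rs : List (List Int)) (j : Int) (h0 : 0 ≤ j) (h1 : j < (rs.length : Int)) :
    PySem.List.pyGetD (PySem.List.pyGetD rs j []) 1 0
      - PySem.List.pyGetD (PySem.List.pyGetD rs j []) 0 0
      + PySem.List.pyGetD (PySem.List.pyGetD rs j []) 2 0
      = (profOf rs).getD j.toNat 0 := by
  rw [PySem.List.pyGetD_eq_getElem rs ([] : List Int) h0 h1]
  rw [List.getD_eq_getElem (profOf rs) 0 (by rw [profOf_len]; omega)]
  simp [profOf]


lemma loop_sim (rs : List (List Int)) (P : List Int)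
    (hP : ∀ i : Int, 1 ≤ i → i < (rs.length : Int) →
      PySem.List.pyGetD P i 0 = (PySem.List.bisectRight (endsOf rs) (keyS rs i) : Int) - 1) :
    ∀ (d : Nat) (a : Int), 1 ≤ a → a ≤ (rs.length : Int) → ((rs.length : Int) - a).toNat = d →
    ∀ (dp : List Int) (best : Int), dp.length = rs.length →
    (∀ k : Nat, k < rs.length → a ≤ (k : Int) → dp.getD k 0 = (profOf rs).getD k 0) →
    best = PySem.List.pyGetD dp (a - 1) 0 →
(((PySem.List.pyRange a (rs.length : Int) 1).foldl (fun (st : List Int × Int) i =>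
        (PySem.List.pySetD st.1 i (max st.2 (if PySem.List.pyGetD P i 0 < 0 then PySem.List.pyGetD st.1 i 0
            else PySem.List.pyGetD st.1 (PySem.List.pyGetD P i 0) 0 + PySem.List.pyGetD st.1 i 0)),
         max st.2 (if PySem.List.pyGetD P i 0 < 0 then PySem.List.pyGetD st.1 i 0
            else PySem.List.pyGetD st.1 (PySem.List.pyGetD P i 0) 0 + PySem.List.pyGetD st.1 i 0)))
        (dp, best)).2
      = PySem.List.pyGetD ((PySem.List.pyRange a (rs.length : Int) 1).foldl (fun dp i =>
          if ((PySem.List.bisectRight (endsOf rs) (PySem.List.pyGetD (PySem.List.pyGetD rs i []) 0 0) : Int) - 1) ≥ 0 then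
            PySem.List.pySetD dp i (max (PySem.List.pyGetD dp (i - 1) 0)
              (PySem.List.pyGetD dp ((PySem.List.bisectRight (endsOf rs) (PySem.List.pyGetD (PySem.List.pyGetD rs i []) 0 0) : Int) - 1) 0
                + PySem.List.pyGetD (PySem.List.pyGetD rs i []) 1 0
                - PySem.List.pyGetD (PySem.List.pyGetD rs i []) 0 0
                + PySem.List.pyGetD (PySem.List.pyGetD rs i []) 2 0))
          else
            PySem.List.pySetD dp i (max (PySem.List.pyGetD dp (i - 1) 0)
              (PySem.List.pyGetD (PySem.List.pyGetD rs i []) 1 0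
                - PySem.List.pyGetD (PySem.List.pyGetD rs i []) 0 0
                + PySem.List.pyGetD (PySem.List.pyGetD rs i []) 2 0))) dp) ((rs.length : Int) - 1) 0)
    ∧ ((PySem.List.pyRange a (rs.length : Int) 1).foldl (fun dp i =>
          if ((PySem.List.bisectRight (endsOf rs) (PySem.List.pyGetD (PySem.List.pyGetD rs i []) 0 0) : Int) - 1) ≥ 0 then
            PySem.List.pySetD dp i (max (PySem.List.pyGetD dp (i - 1) 0)
              (PySem.List.pyGetD dp ((PySem.List.bisectRight (endsOf rs) (PySem.List.pyGetD (PySem.List.pyGetD rs i []) 0 0) : Int) - 1) 0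
                + PySem.List.pyGetD (PySem.List.pyGetD rs i []) 1 0
                - PySem.List.pyGetD (PySem.List.pyGetD rs i []) 0 0
                + PySem.List.pyGetD (PySem.List.pyGetD rs i []) 2 0))
          else
            PySem.List.pySetD dp i (max (PySem.List.pyGetD dp (i - 1) 0)
              (PySem.List.pyGetD (PySem.List.pyGetD rs i []) 1 0
                - PySem.List.pyGetD (PySem.List.pyGetD rs i []) 0 0
                + PySem.List.pyGetD (PySem.List.pyGetD rs i []) 2 0))) dp).length = rs.length := by
  intro d
  induction d with
  | zero =>
    intro a h1a ham hd dp best hlen hinv hbest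
    have ha : a = (rs.length : Int) := by omega
    rw [ha, PySem.List.pyRange_one_eq_nil le_rfl]
    exact ⟨by rw [List.foldl_nil, List.foldl_nil, hbest, ha], hlen⟩
  | succ d ih =>
    intro a h1a ham hd dp best hlen hinv hbest
    have halt : a < (rs.length : Int) := by omega
    rw [PySem.List.pyRange_one_cons halt]
    simp only [List.foldl_cons]
    -- the two step results coincide
    have hpre : PySem.List.pyGetD P a 0
        = (PySem.List.bisectRight (endsOf rs) (PySem.List.pyGetD (PySem.List.pyGetD rs a []) 0 0) : Int) - 1 :=
      hP a h1a halt
    have hprof : PySem.List.pyGetD dp a 0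
        = PySem.List.pyGetD (PySem.List.pyGetD rs a []) 1 0
          - PySem.List.pyGetD (PySem.List.pyGetD rs a []) 0 0
          + PySem.List.pyGetD (PySem.List.pyGetD rs a []) 2 0 := by
      rw [profOf_get rs a (by omega) halt,
        PySem.List.pyGetD_eq_getElem dp (0 : Int) (by omega) (by omega),
        ← List.getD_eq_getElem dp 0 (by omega)]
      exact hinv a.toNat (by omega) (by omega)
    have hgain : (if PySem.List.pyGetD P a 0 < 0 then PySem.List.pyGetD dp a 0
            else PySem.List.pyGetD dp (PySem.List.pyGetD P a 0) 0 + PySem.List.pyGetD dp a 0)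
        = (if ((PySem.List.bisectRight (endsOf rs) (PySem.List.pyGetD (PySem.List.pyGetD rs a []) 0 0) : Int) - 1) ≥ 0 then
            PySem.List.pyGetD dp ((PySem.List.bisectRight (endsOf rs) (PySem.List.pyGetD (PySem.List.pyGetD rs a []) 0 0) : Int) - 1) 0
              + PySem.List.pyGetD (PySem.List.pyGetD rs a []) 1 0
              - PySem.List.pyGetD (PySem.List.pyGetD rs a []) 0 0
              + PySem.List.pyGetD (PySem.List.pyGetD rs a []) 2 0
          else
            PySem.List.pyGetD (PySem.List.pyGetD rs a []) 1 0
              - PySem.List.pyGetD (PySem.List.pyGetD rs a []) 0 0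
              + PySem.List.pyGetD (PySem.List.pyGetD rs a []) 2 0) := by
      rw [hpre]
      by_cases hc : ((PySem.List.bisectRight (endsOf rs) (PySem.List.pyGetD (PySem.List.pyGetD rs a []) 0 0) : Int) - 1) < 0
      · rw [if_pos hc, if_neg (by omega), hprof]
      · rw [if_neg hc, if_pos (by omega), hprof]; ring
    set v := max best (if PySem.List.pyGetD P a 0 < 0 then PySem.List.pyGetD dp a 0
            else PySem.List.pyGetD dp (PySem.List.pyGetD P a 0) 0 + PySem.List.pyGetD dp a 0) with hv
    have hvA : v = max (PySem.List.pyGetD dp (a - 1) 0)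
        (if ((PySem.List.bisectRight (endsOf rs) (PySem.List.pyGetD (PySem.List.pyGetD rs a []) 0 0) : Int) - 1) ≥ 0 then
            PySem.List.pyGetD dp ((PySem.List.bisectRight (endsOf rs) (PySem.List.pyGetD (PySem.List.pyGetD rs a []) 0 0) : Int) - 1) 0
              + PySem.List.pyGetD (PySem.List.pyGetD rs a []) 1 0
              - PySem.List.pyGetD (PySem.List.pyGetD rs a []) 0 0
              + PySem.List.pyGetD (PySem.List.pyGetD rs a []) 2 0
          else
            PySem.List.pyGetD (PySem.List.pyGetD rs a []) 1 0
              - PySem.List.pyGetD (PySem.List.pyGetD rs a []) 0 0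
              + PySem.List.pyGetD (PySem.List.pyGetD rs a []) 2 0) := by
      rw [hv, hbest, hgain]
    have hstepA : (if ((PySem.List.bisectRight (endsOf rs) (PySem.List.pyGetD (PySem.List.pyGetD rs a []) 0 0) : Int) - 1) ≥ 0 then
            PySem.List.pySetD dp a (max (PySem.List.pyGetD dp (a - 1) 0)
              (PySem.List.pyGetD dp ((PySem.List.bisectRight (endsOf rs) (PySem.List.pyGetD (PySem.List.pyGetD rs a []) 0 0) : Int) - 1) 0
                + PySem.List.pyGetD (PySem.List.pyGetD rs a []) 1 0
                - PySem.List.pyGetD (PySem.List.pyGetD rs a []) 0 0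
                + PySem.List.pyGetD (PySem.List.pyGetD rs a []) 2 0))
          else
            PySem.List.pySetD dp a (max (PySem.List.pyGetD dp (a - 1) 0)
              (PySem.List.pyGetD (PySem.List.pyGetD rs a []) 1 0
                - PySem.List.pyGetD (PySem.List.pyGetD rs a []) 0 0
                + PySem.List.pyGetD (PySem.List.pyGetD rs a []) 2 0)))
        = PySem.List.pySetD dp a v := by
      rw [hvA]
      by_cases hc : ((PySem.List.bisectRight (endsOf rs) (PySem.List.pyGetD (PySem.List.pyGetD rs a []) 0 0) : Int) - 1) ≥ 0
      · rw [if_pos hc, if_pos hc]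
      · rw [if_neg hc, if_neg hc]
    rw [hstepA]
    -- apply the induction hypothesis at a+1 with the common new state
    have e2 : ((a.toNat : Int)) = a := Int.toNat_of_nonneg (by omega)
    apply ih (a + 1) (by omega) (by omega) (by omega) (PySem.List.pySetD dp a v) v
      (by rw [PySem.List.length_pySetD]; exact hlen)
      (by
        intro k hk hak
        rw [PySem.List.pySetD_of_nonneg dp v (by omega)]
        rw [List.getD_eq_getElem _ 0 (by rw [List.length_set]; omega)]
        rw [List.getElem_set_ne (by omega)]
        rw [← List.getD_eq_getElem dp 0 (by omega)]
        exact hinv k hk (by omega))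
      (by
        rw [show a + 1 - 1 = a from by omega]
        obtain ⟨b, rfl⟩ : ∃ b : Nat, a = (b : Int) := ⟨a.toNat, e2.symm⟩
        rw [PySem.List.pyGetD_pySetD_natCast dp b b v 0 (by omega)]
        simp)

theorem pv_main : ∀ (n : Int) (rides : List (List Int)), Pre_maxTaxiEarnings n rides →
    maxTaxiEarnings n rides = maxTaxiEarnings_alt n rides := by
  intro n rides hpre
  obtain ⟨hne, h3⟩ := hpre
  simp only [maxTaxiEarnings, maxTaxiEarnings_alt]
  set rs := PySem.List.sorted rides (fun x => PySem.List.pyGetD x 1 0) false with hrs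
  have hperm : rs.Perm rides := PySem.List.sorted_perm rides (fun x => PySem.List.pyGetD x 1 0) false
  have hrsne : rs ≠ [] := by
    intro h
    have hlen0 : rides.length = 0 := by rw [← hperm.length_eq, h]; rfl
    exact hne (List.eq_nil_of_length_eq_zero hlen0)
  have hm1 : 1 ≤ rs.length := List.length_pos_iff.mpr hrsne
  have hpw0 := PySem.List.sorted_pairwise rides (fun x => PySem.List.pyGetD x 1 0)
  have hpw : (endsOf rs).Pairwise (· ≤ ·) := by
    unfold endsOf
    rw [List.pairwise_map]
    exact hpw0
  rw [show rs.map (fun r => PySem.List.pyGetD r 1 0) = endsOf rs from rfl,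
      show rs.map (fun r => PySem.List.pyGetD r 1 0 - PySem.List.pyGetD r 0 0 + PySem.List.pyGetD r 2 0)
        = profOf rs from rfl]
  have hqmem : ∀ i ∈ PySem.List.sorted (PySem.List.pyRange 0 (rs.length : Int) 1)
      (fun i => PySem.List.pyGetD (PySem.List.pyGetD rs i []) 0 0) false,
      0 ≤ i ∧ i < (rs.length : Int) := by
    intro i hi
    rw [PySem.List.mem_sorted] at hi
    exact PySem.List.mem_pyRange_one.mp hi
  have hqpw := PySem.List.sorted_pairwise (PySem.List.pyRange 0 (rs.length : Int) 1)
      (fun i => PySem.List.pyGetD (PySem.List.pyGetD rs i []) 0 0)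
  obtain ⟨hswlen, hsw⟩ := sweep_eq rs hpw
    (PySem.List.sorted (PySem.List.pyRange 0 (rs.length : Int) 1)
      (fun i => PySem.List.pyGetD (PySem.List.pyGetD rs i []) 0 0) false)
    0 (List.replicate rs.length 0) (by simp) hqmem hqpw le_rfl (by positivity)
    (by intro k hk hklt i hi; omega)
  obtain ⟨hfold2, hfoldlen⟩ := loop_sim rs _
    (by
      intro i hi1 hi2
      refine (hsw i (by omega) hi2).1 ?_
      rw [PySem.List.mem_sorted, PySem.List.mem_pyRange_one]
      omega)
    ((rs.length : Int) - 1).toNat 1 le_rfl (by exact_mod_cast hm1) rfl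
    (profOf rs) (PySem.List.pyGetD (profOf rs) 0 0)
    (profOf_len rs) (fun k hk _ => rfl) (by norm_num)
  rw [hfold2]
  -- dp[-1] is the last entry, i.e. entry (len - 1)
  set Afin := (PySem.List.pyRange 1 (rs.length : Int) 1).foldl (fun dp i =>
      if ((PySem.List.bisectRight (endsOf rs) (PySem.List.pyGetD (PySem.List.pyGetD rs i []) 0 0) : Int) - 1) ≥ 0 then
        PySem.List.pySetD dp i (max (PySem.List.pyGetD dp (i - 1) 0)
          (PySem.List.pyGetD dp ((PySem.List.bisectRight (endsOf rs) (PySem.List.pyGetD (PySem.List.pyGetD rs i []) 0 0) : Int) - 1) 0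
            + PySem.List.pyGetD (PySem.List.pyGetD rs i []) 1 0
            - PySem.List.pyGetD (PySem.List.pyGetD rs i []) 0 0
            + PySem.List.pyGetD (PySem.List.pyGetD rs i []) 2 0))
      else
        PySem.List.pySetD dp i (max (PySem.List.pyGetD dp (i - 1) 0)
          (PySem.List.pyGetD (PySem.List.pyGetD rs i []) 1 0
            - PySem.List.pyGetD (PySem.List.pyGetD rs i []) 0 0
            + PySem.List.pyGetD (PySem.List.pyGetD rs i []) 2 0))) (profOf rs) with hA
  have hAne : Afin ≠ [] := by
    intro h
    rw [h] at hfoldlen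
    simp at hfoldlen
    omega
  rw [PySem.List.pyGetD_neg_one Afin 0 hAne]
  rw [List.getLast_eq_getElem]
  rw [PySem.List.pyGetD_eq_getElem Afin (0 : Int) (by omega) (by rw [hfoldlen]; omega)]
  congr 1
  rw [hfoldlen]
  omega

-- ===== VERDICT (by name: the statement is the Claim_ definition above) =====
theorem maxTaxiEarnings_spec : Claim_equal_maxTaxiEarnings := by
  intro n rides _ hpre
  exact pv_main n rides hpre
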